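-- pv_equiv track=rewrite | github.com/edt-yxz-zzd/python3_src | seed/helper/get_unused_prefix.py | _get_unused_prefix
-- ===== SOURCE A (Python) =====
-- def _get_unused_prefix(prefix, names, alphabet):
--     min_ = min(alphabet)
--     while True:
--         names = set(name for name in names if name.startswith(prefix))
--         if not names:
--             return prefix
--
--         i = len(prefix)
--         not_next_chars = set(name[i] for name in names if len(name) > i)
--         next_chars = alphabet - not_next_chars
--         if not next_chars:
--             next_char = min_
--         else:
--             next_char = min(next_chars)
--         prefix += next_char
-- ===== SOURCE B (Python) =====
-- def _get_unused_prefix(prefix, names, alphabet):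
--     # Index the matching names once: `children` maps every path below `prefix`
--     # (a prefix of the rest of some matching name) to the set of characters that
--     # follow it; the walk then does pure dict lookups instead of rescanning names.
--     children = {}
--     for name in names:
--         if name.startswith(prefix):
--             path = ""
--             for ch in name[len(prefix):]:
--                 children.setdefault(path, set()).add(ch)
--                 path += ch
--             children.setdefault(path, set())
--     if not children:
--         return prefix
--     order = sorted(alphabet)
--     path = ""
--     while path in children:
--         used = children[path]
--         path += next((a for a in order if a not in used), order[0])
--     return prefix + path
-- ===== Notes on version B (the rewrite author's own statement) =====
-- stated objective: alternative
-- what changed: B scans the matching names exactly once, building a hash index that maps every path below the prefix to the set of characters following it, and then extends the prefix by a pure dict-lookup walk (membership test + stored child set per level), instead of A's per-level refiltering of the whole name list with startswith and rebuilding of the next-character set.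
-- crash fix: On an empty alphabet with no name starting with prefix, A raises ValueError (min() of an empty set) while B returns prefix unchanged. — e.g. on _get_unused_prefix("a", (["b"], [])): A raises ValueError, B returns "a"
import Mathlib
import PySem

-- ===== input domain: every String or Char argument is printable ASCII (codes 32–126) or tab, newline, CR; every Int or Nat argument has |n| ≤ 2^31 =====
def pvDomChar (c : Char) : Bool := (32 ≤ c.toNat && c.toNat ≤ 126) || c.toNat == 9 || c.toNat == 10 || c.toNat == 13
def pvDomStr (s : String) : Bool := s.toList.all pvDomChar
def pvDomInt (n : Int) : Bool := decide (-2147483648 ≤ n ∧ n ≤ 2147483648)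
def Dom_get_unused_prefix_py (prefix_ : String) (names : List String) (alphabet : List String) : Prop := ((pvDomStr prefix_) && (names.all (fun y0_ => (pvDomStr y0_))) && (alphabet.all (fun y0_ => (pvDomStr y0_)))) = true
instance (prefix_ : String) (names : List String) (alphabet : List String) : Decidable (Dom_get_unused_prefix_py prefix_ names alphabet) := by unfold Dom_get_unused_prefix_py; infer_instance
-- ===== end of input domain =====

-- B indexes the matching names once (a dict mapping every path below the prefix to the set of
-- characters following it) and then extends the prefix by pure dict lookups, instead of A's
-- per-level refiltering of the name list.  Return values only (neither side mutates arguments).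

-- ===== PORT A =====
-- name[i] as a 1-character string (A guards it with len(name) > i, so the none arm is unreachable)
def pvCharAt (n : String) (i : Int) : String :=
  match PySem.Str.pyGet? n i with
  | some c => String.ofList [c]
  | none => ""

-- the `while True:` loop of A; fuel only makes the recursion total (the loop runs forever when
-- '' ∈ alphabet and a name matches, which Pre_ excludes; inside Pre_ the fuel below is never exhausted)
def pvALoop (alphaS : List String) (min_ : String) : Nat → String → List String → String
  | 0, pre, _ => pre
  | fuel+1, pre, ns =>
    let names : PySem.Set String :=
      PySem.Set.ofList (List.filter (fun n => PySem.Str.startswith n pre) ns)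
    if names.isEmpty then pre
    else
      let i : Int := PySem.Str.len pre
      let notNext : PySem.Set String :=
        PySem.Set.ofList ((List.filter (fun n => decide (i < PySem.Str.len n)) names).map
          (fun n => pvCharAt n i))
      let nextChars : PySem.Set String := PySem.Set.diff alphaS notNext
      let nextChar : String :=
        match PySem.List.min? nextChars (fun s => s) with
        | none => min_
        | some m => m
      pvALoop alphaS min_ fuel (pre ++ nextChar) names

def get_unused_prefix_py (prefix_ : String) (names : List String) (alphabet : List String) : String :=
  let alphaS : PySem.Set String := PySem.Set.ofList alphabet
  match PySem.List.min? alphaS (fun s => s) with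
  | none => ""   -- min(alphabet) of an empty set raises ValueError: excluded by Pre_
  | some min_ =>
    pvALoop alphaS min_ ((names.map (fun n => n.toList.length)).foldl max 0 + 2) prefix_ names

-- ===== PORT B =====
-- the inner `for ch in name[len(prefix):]:` loop of B over one matching name:
-- `children.setdefault(path, set()).add(ch); path += ch`, then `children.setdefault(path, set())`;
-- `setdefault(k, set()).add(ch)` stores (old value or empty set) with ch added at key k, which is
-- exactly `insert k ((getD k ∅).add ch)` (overwrite keeps the key's position, like setdefault)
def pvIns : PySem.Dict String (PySem.Set String) → String → List Char → PySem.Dict String (PySem.Set String)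
  | d, path, [] => PySem.Dict.setdefault d path (PySem.Set.ofList [])
  | d, path, ch :: rest =>
      pvIns (PySem.Dict.insert d path
          (PySem.Set.add (PySem.Dict.getD d path (PySem.Set.ofList [])) (String.ofList [ch])))
        (path ++ String.ofList [ch]) rest

-- the `while path in children:` walk of B (same fuel scaffolding as A's loop)
def pvWalk (order : List String) (children : PySem.Dict String (PySem.Set String)) :
    Nat → String → String
  | 0, path => path
  | fuel+1, path =>
    if PySem.Dict.contains children path then
      let used : PySem.Set String := PySem.Dict.getD children path (PySem.Set.ofList [])
      let nextChar : String :=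
        match List.find? (fun a => !PySem.Set.contains used a) order with
        | some a => a
        | none => match order with | [] => "" | f :: _ => f   -- order[0]; [] is outside Pre_
      pvWalk order children fuel (path ++ nextChar)
    else path

def get_unused_prefix_py_alt (prefix_ : String) (names : List String) (alphabet : List String) : String :=
  let children : PySem.Dict String (PySem.Set String) :=
    names.foldl (fun d name =>
      if PySem.Str.startswith name prefix_ then
        pvIns d "" (PySem.Str.slice name (some (PySem.Str.len prefix_)) none).toList
      else d) PySem.Dict.empty
  if children.items.isEmpty then prefix_   -- `if not children: return prefix`
  else
    let order : List String := PySem.List.sorted (PySem.Set.ofList alphabet) (fun s => s) false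
    prefix_ ++ pvWalk order children ((names.map (fun n => n.toList.length)).foldl max 0 + 2) ""

-- ===== PRECONDITION & SPEC =====
-- Pre_ excludes exactly the inputs on which A does not return: alphabet = ∅ (min() raises
-- ValueError) and '' ∈ alphabet while some name starts with prefix (A then appends '' forever).
def Pre_get_unused_prefix_py (prefix_ : String) (names : List String) (alphabet : List String) : Prop :=
  alphabet ≠ [] ∧ ("" ∈ alphabet → ∀ n ∈ names, PySem.Str.startswith n prefix_ = false)
instance (prefix_ : String) (names : List String) (alphabet : List String) : Decidable (Pre_get_unused_prefix_py prefix_ names alphabet) := by unfold Pre_get_unused_prefix_py; infer_instance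
def pvWitness_get_unused_prefix_py : String × List String × List String := ("x", (["xa", "y"], ["a", "b"]))

-- On an empty alphabet with no name starting with prefix, A raises ValueError (min of the empty
-- set) while B returns prefix unchanged.
def Raises_get_unused_prefix_py (prefix_ : String) (names : List String) (alphabet : List String) : Prop :=
  alphabet = [] ∧ ∀ n ∈ names, PySem.Str.startswith n prefix_ = false
instance (prefix_ : String) (names : List String) (alphabet : List String) : Decidable (Raises_get_unused_prefix_py prefix_ names alphabet) := by unfold Raises_get_unused_prefix_py; infer_instance
def pvRaiseWitness_get_unused_prefix_py : String × List String × List String := ("a", (["b"], []))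
def pvRaiseWitnessOut_get_unused_prefix_py : String := "a"

def Spec_get_unused_prefix_py (prefix_ : String) (names : List String) (alphabet : List String) (out : String) : Prop := out = get_unused_prefix_py_alt prefix_ names alphabet
instance (prefix_ : String) (names : List String) (alphabet : List String) (out : String) : Decidable (Spec_get_unused_prefix_py prefix_ names alphabet out) := by unfold Spec_get_unused_prefix_py; infer_instance

-- ===== CLAIM (what is proved, stated in full; the proofs are below) =====
def Claim_equal_get_unused_prefix_py : Prop := ∀ (prefix_ : String) (names : List String) (alphabet : List String), Dom_get_unused_prefix_py prefix_ names alphabet → Pre_get_unused_prefix_py prefix_ names alphabet → Spec_get_unused_prefix_py prefix_ names alphabet (get_unused_prefix_py prefix_ names alphabet)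
def Claim_raises_get_unused_prefix_py : Prop := (∀ (prefix_ : String) (names : List String) (alphabet : List String), Dom_get_unused_prefix_py prefix_ names alphabet → Raises_get_unused_prefix_py prefix_ names alphabet → ¬ Pre_get_unused_prefix_py prefix_ names alphabet) ∧ (Dom_get_unused_prefix_py (pvRaiseWitness_get_unused_prefix_py.1) (pvRaiseWitness_get_unused_prefix_py.2.1) (pvRaiseWitness_get_unused_prefix_py.2.2) ∧ Raises_get_unused_prefix_py (pvRaiseWitness_get_unused_prefix_py.1) (pvRaiseWitness_get_unused_prefix_py.2.1) (pvRaiseWitness_get_unused_prefix_py.2.2) ∧ get_unused_prefix_py_alt (pvRaiseWitness_get_unused_prefix_py.1) (pvRaiseWitness_get_unused_prefix_py.2.1) (pvRaiseWitness_get_unused_prefix_py.2.2) = pvRaiseWitnessOut_get_unused_prefix_py)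

-- ===== LEMMAS AND PROOFS =====

-- "a is a one-character string, the character with which some name of ns continues pre"
def pvNX (ns : List String) (pre a : String) : Prop :=
  ∃ c : Char, a = String.ofList [c] ∧
    ∃ n ∈ ns, PySem.Str.startswith n (pre ++ String.ofList [c]) = true

-- startswith unfolded to list-prefix
lemma pv_sw_iff (n pre : String) :
    PySem.Str.startswith n pre = true ↔ pre.toList <+: n.toList := by
  rw [PySem.Str.startswith_eq, PySem.Chars.startswith_iff]

-- n[len(pre):] on code points is a drop
lemma pv_slice_toList (n pre : String) :
    (PySem.Str.slice n (some (PySem.Str.len pre)) none).toList = n.toList.drop pre.toList.length := by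
  rw [PySem.Str.toList_slice, PySem.Chars.slice_eq_listSlice, PySem.Str.len_eq,
    PySem.List.slice_from_natCast]

lemma pv_prefix_split {α : Type} (l p q : List α) :
    p ++ q <+: l ↔ p <+: l ∧ q <+: l.drop p.length := by
  constructor
  · rintro ⟨r, hr⟩
    subst hr
    refine ⟨⟨q ++ r, by simp⟩, ?_⟩
    rw [List.append_assoc, List.drop_left]
    exact ⟨r, rfl⟩
  · rintro ⟨⟨m, hm⟩, hq⟩
    subst hm
    rw [List.drop_left] at hq
    rw [List.prefix_append_right_inj]
    exact hq

lemma pv_sw_mono (n u v : String) (h : PySem.Str.startswith n (u ++ v) = true) :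
    PySem.Str.startswith n u = true := by
  rw [pv_sw_iff] at h ⊢
  rw [String.toList_append] at h
  exact List.IsPrefix.trans (List.prefix_append _ _) h

-- pvCharAt at index len(pre), through the list view
lemma pv_charAt_eq (n pre : String) :
    pvCharAt n (PySem.Str.len pre) =
      (match n.toList[pre.toList.length]? with | some c => String.ofList [c] | none => "") := by
  unfold pvCharAt
  rw [PySem.Str.len_eq, PySem.Str.pyGet?_eq, PySem.Chars.pyGet?_eq_listPyGet?,
    PySem.List.pyGet?_natCast]

-- the one-character extension test: given pre <+: n, "n continues pre with c" ↔ A's guard + char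
lemma pv_next_char (n pre : String) (c : Char) (hsw : PySem.Str.startswith n pre = true) :
    PySem.Str.startswith n (pre ++ String.ofList [c]) = true ↔
      (PySem.Str.len pre < PySem.Str.len n ∧ pvCharAt n (PySem.Str.len pre) = String.ofList [c]) := by
  rw [pv_sw_iff] at hsw ⊢
  obtain ⟨m, hm⟩ := hsw
  have hget : pvCharAt n (PySem.Str.len pre) =
      (match n.toList[pre.toList.length]? with | some c => String.ofList [c] | none => "") := by
    unfold pvCharAt
    rw [PySem.Str.len_eq, PySem.Str.pyGet?_eq, PySem.Chars.pyGet?_eq_listPyGet?,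
      PySem.List.pyGet?_natCast]
  have hlen : PySem.Str.len pre < PySem.Str.len n ↔ pre.toList.length < n.toList.length := by
    rw [PySem.Str.len_eq, PySem.Str.len_eq]; exact_mod_cast Iff.rfl
  rw [String.toList_append, hget, hlen]
  constructor
  · intro h
    obtain ⟨r, hr⟩ := h
    simp only [String.toList_ofList] at hr
    have hlt : pre.toList.length < n.toList.length := by
      rw [← hr]; simp
    have : n.toList[pre.toList.length]? = some c := by
      rw [← hr, List.append_assoc, List.getElem?_append_right (le_refl _)]
      simp
    rw [this]
    exact ⟨hlt, rfl⟩
  · rintro ⟨hlt, heq⟩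
    cases hg : n.toList[pre.toList.length]? with
    | none => rw [hg] at heq; simp at heq
    | some c0 =>
      rw [hg] at heq
      have : c0 = c := by
        have := congrArg String.toList heq
        simpa using this
      subst this
      rw [← hm] at hg ⊢
      rw [List.getElem?_append_right (le_refl _)] at hg
      simp only [Nat.sub_self] at hg
      cases m with
      | nil => simp at hg
      | cons x xs =>
        simp at hg
        subst hg
        exact ⟨xs, by simp⟩

-- membership in A's not_next_chars set, for a list of names all starting with pre
lemma pv_notNext_mem (ns : List String) (pre a : String)
    (h : ∀ n ∈ ns, PySem.Str.startswith n pre = true) :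
    a ∈ PySem.Set.ofList ((List.filter (fun n => decide (PySem.Str.len pre < PySem.Str.len n)) ns).map
        (fun n => pvCharAt n (PySem.Str.len pre))) ↔ pvNX ns pre a := by
  rw [PySem.Set.mem_ofList]
  simp only [List.mem_map, List.mem_filter]
  constructor
  · rintro ⟨n, ⟨hn, hlen⟩, rfl⟩
    have hlt : PySem.Str.len pre < PySem.Str.len n := of_decide_eq_true hlen
    have hlt' : pre.toList.length < n.toList.length := by
      have := hlt; rw [PySem.Str.len_eq, PySem.Str.len_eq] at this; exact_mod_cast this
    have hc0 : n.toList[pre.toList.length]? = some (n.toList[pre.toList.length]'hlt') :=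
      List.getElem?_eq_getElem hlt'
    have hchar : pvCharAt n (PySem.Str.len pre)
        = String.ofList [n.toList[pre.toList.length]'hlt'] := by
      rw [pv_charAt_eq, hc0]
    exact ⟨_, hchar, n, hn, (pv_next_char n pre _ (h n hn)).2 ⟨hlt, hchar⟩⟩
  · rintro ⟨c, ha, n, hn, hswc⟩
    obtain ⟨hlt, hchar⟩ := (pv_next_char n pre c (h n hn)).1 hswc
    exact ⟨n, ⟨hn, decide_eq_true hlt⟩, (ha.trans hchar.symm).symm⟩

-- effect of inserting one suffix on the keys of the index
lemma pv_ins_contains (s : List Char) (d : PySem.Dict String (PySem.Set String))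
    (path0 p : String) :
    PySem.Dict.contains (pvIns d path0 s) p = true ↔
      PySem.Dict.contains d p = true ∨ ∃ t, t <+: s ∧ p.toList = path0.toList ++ t := by
  induction s generalizing d path0 with
  | nil =>
    have hdisj : (∃ t, t <+: ([] : List Char) ∧ p.toList = path0.toList ++ t) ↔ p = path0 := by
      constructor
      · rintro ⟨t, ht, hp⟩
        rw [List.prefix_nil.1 ht, List.append_nil] at hp
        exact String.toList_inj.1 hp
      · rintro rfl
        exact ⟨[], List.nil_prefix, by simp⟩
    show PySem.Dict.contains (PySem.Dict.setdefault d path0 (PySem.Set.ofList [])) p = true ↔ _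
    rw [hdisj]
    by_cases hc : PySem.Dict.contains d path0 = true
    · rw [PySem.Dict.setdefault_of_contains _ _ hc]
      constructor
      · exact Or.inl
      · rintro (h | rfl)
        · exact h
        · exact hc
    · rw [PySem.Dict.setdefault_of_not_contains _ _ (by simpa using hc),
        PySem.Dict.contains_insert]
      constructor
      · intro h
        rcases Bool.or_eq_true_iff.1 h with h | h
        · exact Or.inr (by simpa using h)
        · exact Or.inl h
      · rintro (h | rfl)
        · simp [h]
        · simp
  | cons c rest ih =>
    show PySem.Dict.contains (pvIns _ (path0 ++ String.ofList [c]) rest) p = true ↔ _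
    rw [ih]
    rw [PySem.Dict.contains_insert]
    have htl : (path0 ++ String.ofList [c]).toList = path0.toList ++ [c] := by simp
    constructor
    · rintro (h | ⟨t, ht, hp⟩)
      · rcases Bool.or_eq_true_iff.1 h with h | h
        · have : p = path0 := by simpa using h
          subst this
          exact Or.inr ⟨[], List.nil_prefix, by simp⟩
        · exact Or.inl h
      · refine Or.inr ⟨c :: t, List.cons_prefix_cons.2 ⟨rfl, ht⟩, ?_⟩
        rw [hp, htl, List.append_assoc]
        simp
    · rintro (h | ⟨t, ht, hp⟩)
      · exact Or.inl (by simp [h])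
      · rcases List.prefix_cons_iff.1 ht with rfl | ⟨t', rfl, ht'⟩
        · have : p = path0 := String.toList_inj.1 (by simpa using hp)
          exact Or.inl (by simp [this])
        · refine Or.inr ⟨t', ht', ?_⟩
          rw [hp, htl, List.append_assoc]
          simp

-- effect of inserting one suffix on the stored child sets
lemma pv_ins_mem (s : List Char) (d : PySem.Dict String (PySem.Set String))
    (path0 p a : String) :
    a ∈ PySem.Dict.getD (pvIns d path0 s) p (PySem.Set.ofList []) ↔
      a ∈ PySem.Dict.getD d p (PySem.Set.ofList []) ∨
        ∃ t c, t ++ [c] <+: s ∧ p.toList = path0.toList ++ t ∧ a = String.ofList [c] := by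
  induction s generalizing d path0 with
  | nil =>
    have hno : ¬ ∃ t c, t ++ [c] <+: ([] : List Char) ∧ p.toList = path0.toList ++ t ∧
        a = String.ofList [c] := by
      rintro ⟨t, c, ht, -, -⟩
      have := List.prefix_nil.1 ht
      simp at this
    show a ∈ PySem.Dict.getD (PySem.Dict.setdefault d path0 (PySem.Set.ofList [])) p _ ↔ _
    by_cases hc : PySem.Dict.contains d path0 = true
    · rw [PySem.Dict.setdefault_of_contains _ _ hc]
      exact ⟨Or.inl, fun h => h.resolve_right hno⟩
    · rw [PySem.Dict.setdefault_of_not_contains _ _ (by simpa using hc), PySem.Dict.getD_insert]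
      split_ifs with hp
      · subst hp
        rw [PySem.Dict.getD_of_not_contains _ _ (by simpa using hc)]
        exact ⟨Or.inl, fun h => h.resolve_right hno⟩
      · exact ⟨Or.inl, fun h => h.resolve_right hno⟩
  | cons c rest ih =>
    show a ∈ PySem.Dict.getD (pvIns _ (path0 ++ String.ofList [c]) rest) p _ ↔ _
    rw [ih, PySem.Dict.getD_insert]
    have htl : (path0 ++ String.ofList [c]).toList = path0.toList ++ [c] := by simp
    constructor
    · rintro (h | ⟨t, c', ht, hp, ha⟩)
      · by_cases hp : p = path0
        · rw [if_pos hp] at h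
          rcases (PySem.Set.mem_add _ _ _).1 h with h | rfl
          · exact Or.inl (hp ▸ h)
          · exact Or.inr ⟨[], c, by simp, by simp [hp], rfl⟩
        · rw [if_neg hp] at h
          exact Or.inl h
      · refine Or.inr ⟨c :: t, c', List.cons_prefix_cons.2 ⟨rfl, ht⟩, ?_, ha⟩
        rw [hp, htl, List.append_assoc]
        simp
    · rintro (h | ⟨t, c', ht, hp, ha⟩)
      · by_cases hp : p = path0
        · exact Or.inl (by rw [if_pos hp]; exact (PySem.Set.mem_add _ _ _).2 (Or.inl (hp ▸ h)))
        · exact Or.inl (by rw [if_neg hp]; exact h)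
      · rcases List.prefix_cons_iff.1 ht with hnil | ⟨t'', heq, ht''⟩
        · simp at hnil
        · cases t with
          | nil =>
            have hc' : c = c' ∧ t'' = [] := by
              simpa using heq.symm
            have hp' : p = path0 := String.toList_inj.1 (by simpa using hp)
            refine Or.inl ?_
            rw [if_pos hp']
            exact (PySem.Set.mem_add _ _ _).2 (Or.inr (by rw [ha, hc'.1]))
          | cons x xs =>
            have hx : c = x ∧ t'' = xs ++ [c'] := by
              simpa using heq.symm
            refine Or.inr ⟨xs, c', hx.2 ▸ ht'', ?_, ha⟩
            rw [hp, htl, List.append_assoc, ← hx.1]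
            simp

-- keys of the whole index: the prefixes of the suffixes of the matching names
set_option maxHeartbeats 1000000 in
lemma pv_build_contains (prefix_ : String) (names : List String)
    (d : PySem.Dict String (PySem.Set String)) (p : String) :
    PySem.Dict.contains (names.foldl (fun d name =>
        if PySem.Str.startswith name prefix_ then
          pvIns d "" (PySem.Str.slice name (some (PySem.Str.len prefix_)) none).toList
        else d) d) p = true ↔
      PySem.Dict.contains d p = true ∨ ∃ n ∈ names, PySem.Str.startswith n prefix_ = true ∧
        p.toList <+: (PySem.Str.slice n (some (PySem.Str.len prefix_)) none).toList := by
  induction names generalizing d with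
  | nil => simp
  | cons n rest ih =>
    rw [List.foldl_cons, ih]
    by_cases hsw : PySem.Str.startswith n prefix_ = true
    · rw [if_pos hsw, pv_ins_contains]
      have : (∃ t, t <+: (PySem.Str.slice n (some (PySem.Str.len prefix_)) none).toList ∧
          p.toList = String.toList "" ++ t) ↔
          p.toList <+: (PySem.Str.slice n (some (PySem.Str.len prefix_)) none).toList := by
        constructor
        · rintro ⟨t, ht, hp⟩
          rw [show String.toList "" ++ t = t by simp] at hp
          exact hp ▸ ht
        · intro h
          exact ⟨p.toList, h, by simp⟩
      rw [this]
      constructor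
      · rintro ((h | h) | ⟨m, hm, h1, h2⟩)
        · exact Or.inl h
        · exact Or.inr ⟨n, List.mem_cons_self .., hsw, h⟩
        · exact Or.inr ⟨m, List.mem_cons_of_mem _ hm, h1, h2⟩
      · rintro (h | ⟨m, hm, h1, h2⟩)
        · exact Or.inl (Or.inl h)
        · rcases List.mem_cons.1 hm with rfl | hm'
          · exact Or.inl (Or.inr h2)
          · exact Or.inr ⟨m, hm', h1, h2⟩
    · rw [if_neg hsw]
      constructor
      · rintro (h | ⟨m, hm, h1, h2⟩)
        · exact Or.inl h
        · exact Or.inr ⟨m, List.mem_cons_of_mem _ hm, h1, h2⟩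
      · rintro (h | ⟨m, hm, h1, h2⟩)
        · exact Or.inl h
        · rcases List.mem_cons.1 hm with rfl | hm'
          · exact absurd h1 hsw
          · exact Or.inr ⟨m, hm', h1, h2⟩

-- child sets of the whole index
set_option maxHeartbeats 1000000 in
lemma pv_build_mem (prefix_ : String) (names : List String)
    (d : PySem.Dict String (PySem.Set String)) (p a : String) :
    a ∈ PySem.Dict.getD (names.foldl (fun d name =>
        if PySem.Str.startswith name prefix_ then
          pvIns d "" (PySem.Str.slice name (some (PySem.Str.len prefix_)) none).toList
        else d) d) p (PySem.Set.ofList []) ↔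
      a ∈ PySem.Dict.getD d p (PySem.Set.ofList []) ∨
        ∃ n ∈ names, PySem.Str.startswith n prefix_ = true ∧
          ∃ c, p.toList ++ [c] <+: (PySem.Str.slice n (some (PySem.Str.len prefix_)) none).toList ∧
            a = String.ofList [c] := by
  induction names generalizing d with
  | nil => simp
  | cons n rest ih =>
    rw [List.foldl_cons, ih]
    by_cases hsw : PySem.Str.startswith n prefix_ = true
    · rw [if_pos hsw, pv_ins_mem]
      have : (∃ t c, t ++ [c] <+: (PySem.Str.slice n (some (PySem.Str.len prefix_)) none).toList ∧
          p.toList = String.toList "" ++ t ∧ a = String.ofList [c]) ↔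
          (∃ c, p.toList ++ [c] <+: (PySem.Str.slice n (some (PySem.Str.len prefix_)) none).toList ∧
          a = String.ofList [c]) := by
        constructor
        · rintro ⟨t, c, ht, hp, ha⟩
          rw [show String.toList "" ++ t = t by simp] at hp
          exact ⟨c, hp ▸ ht, ha⟩
        · rintro ⟨c, h, ha⟩
          exact ⟨p.toList, c, h, by simp, ha⟩
      rw [this]
      constructor
      · rintro ((h | h) | ⟨m, hm, h1, h2⟩)
        · exact Or.inl h
        · exact Or.inr ⟨n, List.mem_cons_self .., hsw, h⟩
        · exact Or.inr ⟨m, List.mem_cons_of_mem _ hm, h1, h2⟩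
      · rintro (h | ⟨m, hm, h1, h2⟩)
        · exact Or.inl (Or.inl h)
        · rcases List.mem_cons.1 hm with rfl | hm'
          · exact Or.inl (Or.inr h2)
          · exact Or.inr ⟨m, hm', h1, h2⟩
    · rw [if_neg hsw]
      constructor
      · rintro (h | ⟨m, hm, h1, h2⟩)
        · exact Or.inl h
        · exact Or.inr ⟨m, List.mem_cons_of_mem _ hm, h1, h2⟩
      · rintro (h | ⟨m, hm, h1, h2⟩)
        · exact Or.inl h
        · rcases List.mem_cons.1 hm with rfl | hm'
          · exact absurd h1 hsw
          · exact Or.inr ⟨m, hm', h1, h2⟩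

-- min of a set = head of the sorted set
lemma pv_head_sorted (s : List String) (m : String)
    (hmin : PySem.List.min? s (fun x => x) = some m) :
    (match PySem.List.sorted s (fun x => x) false with | [] => "" | f :: _ => f) = m := by
  cases hs : PySem.List.sorted s (fun x => x) false with
  | nil =>
    exact absurd ((PySem.List.sorted_eq_nil_iff s _ false).1 hs) (by
      intro h; subst h; simp [PySem.List.min?] at hmin)
  | cons f t =>
    have hf : f ∈ s := (PySem.List.mem_sorted s _ false f).1 (hs ▸ List.mem_cons_self ..)
    have h1 : f ≤ m := by simpa using PySem.List.key_head_sorted_le s _ hs m (PySem.List.min?_mem hmin)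
    have h2 : m ≤ f := by simpa using PySem.List.min?_isMin hmin f hf
    exact le_antisymm h1 h2

-- scanning the sorted list for the first element satisfying p = min of the filtered list
lemma pv_find_sorted_eq_min (p : String → Bool) (s : List String) :
    List.find? p (PySem.List.sorted s (fun x => x) false) = PySem.List.min? (List.filter p s) (fun x => x) := by
  cases hf : List.find? p (PySem.List.sorted s (fun x => x) false) with
  | none =>
    have h : ∀ x ∈ s, ¬ p x = true := fun x hx =>
      List.find?_eq_none.1 hf x ((PySem.List.mem_sorted s _ false x).2 hx)
    rw [eq_comm, PySem.List.min?_eq_none_iff, List.filter_eq_nil_iff]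
    exact h
  | some m =>
    obtain ⟨hpm, as, bs, hdec, has⟩ := List.find?_eq_some_iff_append.1 hf
    have hm_mem : m ∈ s := (PySem.List.mem_sorted s _ false m).1 (List.mem_of_find?_eq_some hf)
    have hfil : m ∈ List.filter p s := List.mem_filter.2 ⟨hm_mem, hpm⟩
    cases hmin : PySem.List.min? (List.filter p s) (fun x => x) with
    | none =>
      rw [PySem.List.min?_eq_none_iff] at hmin
      simp [hmin] at hfil
    | some m' =>
      have hm'fil := PySem.List.min?_mem hmin
      have hm'le : m' ≤ m := by simpa using PySem.List.min?_isMin hmin m hfil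
      have hm'mem : m' ∈ PySem.List.sorted s (fun x : String => x) false := by
        rw [PySem.List.mem_sorted]; exact (List.mem_filter.1 hm'fil).1
      have hpm' : p m' = true := (List.mem_filter.1 hm'fil).2
      have hle : m ≤ m' := by
        rw [hdec] at hm'mem
        rcases List.mem_append.1 hm'mem with h | h
        · exact absurd hpm' (by simpa using has m' h)
        · rcases List.mem_cons.1 h with h | h
          · exact le_of_eq h.symm
          · have hpw := PySem.List.sorted_pairwise s (fun x : String => x)
            rw [hdec] at hpw
            exact (List.pairwise_cons.1 (List.pairwise_append.1 hpw).2.1).1 m' h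
      exact congrArg some (le_antisymm hle hm'le)

-- the two loops in lockstep: A's current prefix is prefix_ ++ B's path, A's surviving names are
-- described by the index built once by B
lemma pv_lockstep (prefix_ : String) (names : List String) (alphaS : List String) (min_ : String)
    (hmin : PySem.List.min? alphaS (fun s => s) = some min_)
    (children : PySem.Dict String (PySem.Set String))
    (hK : ∀ q : String, PySem.Dict.contains children q = true ↔
        ∃ n ∈ names, PySem.Str.startswith n (prefix_ ++ q) = true)
    (hU : ∀ q a : String, a ∈ PySem.Dict.getD children q (PySem.Set.ofList []) ↔
        pvNX names (prefix_ ++ q) a) :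
    ∀ (fuel : Nat) (path : String) (ns : List String),
      (∀ q : String, (∃ n ∈ ns, PySem.Str.startswith n ((prefix_ ++ path) ++ q) = true) ↔
          (∃ n ∈ names, PySem.Str.startswith n ((prefix_ ++ path) ++ q) = true)) →
      pvALoop alphaS min_ fuel (prefix_ ++ path) ns
        = prefix_ ++ pvWalk (PySem.List.sorted alphaS (fun s => s) false) children fuel path := by
  intro fuel
  induction fuel with
  | zero => intro path ns _; rfl
  | succ fuel ih =>
    intro path ns H1
    have hpre0 : (prefix_ ++ path) ++ "" = prefix_ ++ path := by simp
    have hex : (∃ n ∈ ns, PySem.Str.startswith n (prefix_ ++ path) = true) ↔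
        PySem.Dict.contains children path = true := by
      have h1 := H1 ""
      rw [hpre0] at h1
      exact h1.trans (hK path).symm
    have hMnil : (PySem.Set.ofList (List.filter (fun n => PySem.Str.startswith n (prefix_ ++ path)) ns)).isEmpty
        = !PySem.Dict.contains children path := by
      cases hcc : PySem.Dict.contains children path with
      | true =>
        obtain ⟨n, hn, hsw⟩ := hex.2 hcc
        have hmem : n ∈ PySem.Set.ofList (List.filter (fun n => PySem.Str.startswith n (prefix_ ++ path)) ns) :=
          (PySem.Set.mem_ofList _ _).2 (List.mem_filter.2 ⟨hn, hsw⟩)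
        simp only [Bool.not_true]
        rw [Bool.eq_false_iff]
        intro hie
        rw [List.isEmpty_iff] at hie
        rw [hie] at hmem
        cases hmem
      | false =>
        simp only [Bool.not_false]
        rw [List.isEmpty_iff, List.eq_nil_iff_forall_not_mem]
        intro x hx
        obtain ⟨hxn, hxsw⟩ := List.mem_filter.1 ((PySem.Set.mem_ofList _ _).1 hx)
        exact absurd (hex.1 ⟨x, hxn, hxsw⟩) (by simp [hcc])
    simp only [pvALoop, pvWalk]
    rw [hMnil]
    cases hcc : PySem.Dict.contains children path with
    | false => simp
    | true =>
      simp only [Bool.not_true, Bool.false_eq_true, if_false, if_true]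
      set pre := prefix_ ++ path with hpredef
      set M := PySem.Set.ofList (List.filter (fun n => PySem.Str.startswith n pre) ns) with hMdef
      set NN := PySem.Set.ofList ((List.filter (fun n => decide (PySem.Str.len pre < PySem.Str.len n)) M).map
        (fun n => pvCharAt n (PySem.Str.len pre))) with hNNdef
      set U := PySem.Dict.getD children path (PySem.Set.ofList []) with hUdef
      have hMsw : ∀ n ∈ M, PySem.Str.startswith n pre = true := fun n hn =>
        (List.mem_filter.1 ((PySem.Set.mem_ofList _ _).1 hn)).2
      have hMns : ∀ n, n ∈ M ↔ n ∈ ns ∧ PySem.Str.startswith n pre = true := fun n => by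
        rw [hMdef, PySem.Set.mem_ofList, List.mem_filter]
      have hmemNNU : ∀ x, x ∈ NN ↔ x ∈ U := by
        intro x
        rw [hNNdef, pv_notNext_mem M pre x hMsw, hUdef, hU path x]
        unfold pvNX
        refine exists_congr fun c => and_congr_right fun _ => ?_
        constructor
        · rintro ⟨n, hnM, hsw⟩
          exact (H1 (String.ofList [c])).1 ⟨n, (hMns n).1 hnM |>.1, hsw⟩
        · rintro ⟨n, hn, hsw⟩
          obtain ⟨n', hn', hsw'⟩ := (H1 (String.ofList [c])).2 ⟨n, hn, hsw⟩
          exact ⟨n', (hMns n').2 ⟨hn', pv_sw_mono _ _ _ hsw'⟩, hsw'⟩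
      have hcont : ∀ a, PySem.Set.contains NN a = PySem.Set.contains U a := fun a => by
        rw [Bool.eq_iff_iff, PySem.Set.contains_iff, PySem.Set.contains_iff]
        exact hmemNNU a
      have hdiff : PySem.Set.diff alphaS NN = List.filter (fun a => !PySem.Set.contains U a) alphaS :=
        List.filter_congr (fun a _ => by rw [hcont])
      have hfind : List.find? (fun a => !PySem.Set.contains U a) (PySem.List.sorted alphaS (fun s => s) false)
          = PySem.List.min? (PySem.Set.diff alphaS NN) (fun s => s) := by
        rw [pv_find_sorted_eq_min, hdiff]
      have hnc : (match PySem.List.min? (PySem.Set.diff alphaS NN) (fun s : String => s) with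
            | none => min_ | some m => m)
          = (match List.find? (fun a => !PySem.Set.contains U a) (PySem.List.sorted alphaS (fun s => s) false) with
            | some a => a
            | none => match PySem.List.sorted alphaS (fun s : String => s) false with | [] => "" | f :: _ => f) := by
        rw [hfind]
        cases h : PySem.List.min? (PySem.Set.diff alphaS NN) (fun s : String => s) with
        | none => exact (pv_head_sorted alphaS min_ hmin).symm
        | some m => rfl
      rw [← hnc]
      set nc := (match PySem.List.min? (PySem.Set.diff alphaS NN) (fun s : String => s) with
        | none => min_ | some m => m) with hncdef
      have hassoc : pre ++ nc = prefix_ ++ (path ++ nc) := by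
        rw [hpredef, String.append_assoc]
      have H1' : ∀ q : String, (∃ n ∈ M, PySem.Str.startswith n ((prefix_ ++ (path ++ nc)) ++ q) = true) ↔
          (∃ n ∈ names, PySem.Str.startswith n ((prefix_ ++ (path ++ nc)) ++ q) = true) := by
        intro q
        have hflat : (prefix_ ++ (path ++ nc)) ++ q = pre ++ (nc ++ q) := by
          simp [hpredef, String.append_assoc]
        rw [hflat]
        have hstep : (∃ n ∈ M, PySem.Str.startswith n (pre ++ (nc ++ q)) = true) ↔
            (∃ n ∈ ns, PySem.Str.startswith n (pre ++ (nc ++ q)) = true) := by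
          constructor
          · rintro ⟨n, hnM, hsw⟩
            exact ⟨n, ((hMns n).1 hnM).1, hsw⟩
          · rintro ⟨n, hn, hsw⟩
            exact ⟨n, (hMns n).2 ⟨hn, pv_sw_mono _ _ _ hsw⟩, hsw⟩
        have h1 := H1 (nc ++ q)
        rw [show (prefix_ ++ path) ++ (nc ++ q) = pre ++ (nc ++ q) from rfl] at h1
        exact hstep.trans h1
      rw [hassoc]
      exact ih (path ++ nc) M H1'

-- the name loop when no name matches: the index stays empty
lemma pv_fold_skip (prefix_ : String) (ns : List String)
    (d : PySem.Dict String (PySem.Set String))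
    (h : ∀ n ∈ ns, PySem.Str.startswith n prefix_ = false) :
    ns.foldl (fun d name =>
        if PySem.Str.startswith name prefix_ then
          pvIns d "" (PySem.Str.slice name (some (PySem.Str.len prefix_)) none).toList
        else d) d = d := by
  induction ns generalizing d with
  | nil => rfl
  | cons n rest ih =>
    rw [List.foldl_cons, if_neg (by rw [h n (List.mem_cons_self ..)]; exact Bool.false_ne_true),
      ih _ (fun m hm => h m (List.mem_cons_of_mem _ hm))]

-- ===== VERDICT (by name: the statement is the Claim_ definition above) =====
theorem get_unused_prefix_py_spec : Claim_equal_get_unused_prefix_py := by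
  intro prefix_ names alphabet _ hpre
  unfold Spec_get_unused_prefix_py get_unused_prefix_py get_unused_prefix_py_alt
  simp only []
  set children := names.foldl (fun d name =>
      if PySem.Str.startswith name prefix_ then
        pvIns d "" (PySem.Str.slice name (some (PySem.Str.len prefix_)) none).toList
      else d) PySem.Dict.empty with hchildren
  have hK : ∀ q : String, PySem.Dict.contains children q = true ↔
      ∃ n ∈ names, PySem.Str.startswith n (prefix_ ++ q) = true := by
    intro q
    rw [hchildren, pv_build_contains]
    have hper : ∀ n : String, PySem.Str.startswith n (prefix_ ++ q) = true ↔
        (PySem.Str.startswith n prefix_ = true ∧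
          q.toList <+: (PySem.Str.slice n (some (PySem.Str.len prefix_)) none).toList) := by
      intro n
      rw [pv_sw_iff, String.toList_append, pv_prefix_split, ← pv_sw_iff, pv_slice_toList]
    simp only [PySem.Dict.contains_empty, Bool.false_eq_true, false_or]
    constructor
    · rintro ⟨n, hn, h1, h2⟩
      exact ⟨n, hn, (hper n).2 ⟨h1, h2⟩⟩
    · rintro ⟨n, hn, h⟩
      obtain ⟨h1, h2⟩ := (hper n).1 h
      exact ⟨n, hn, h1, h2⟩
  have hU : ∀ q a : String, a ∈ PySem.Dict.getD children q (PySem.Set.ofList []) ↔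
      pvNX names (prefix_ ++ q) a := by
    intro q a
    rw [hchildren, pv_build_mem]
    have hper : ∀ (n : String) (c : Char),
        PySem.Str.startswith n ((prefix_ ++ q) ++ String.ofList [c]) = true ↔
        (PySem.Str.startswith n prefix_ = true ∧
          q.toList ++ [c] <+: (PySem.Str.slice n (some (PySem.Str.len prefix_)) none).toList) := by
      intro n c
      rw [pv_sw_iff, String.toList_append, String.toList_append, String.toList_ofList,
        List.append_assoc, pv_prefix_split, ← pv_sw_iff, pv_slice_toList]
    have hempty : a ∈ PySem.Dict.getD (PySem.Dict.empty : PySem.Dict String (PySem.Set String)) q (PySem.Set.ofList []) ↔ False := by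
      rw [PySem.Dict.getD_empty]
      simp [PySem.Set.ofList]
    rw [hempty]
    unfold pvNX
    simp only [false_or]
    constructor
    · rintro ⟨n, hn, h1, c, h2, ha⟩
      exact ⟨c, ha, n, hn, (hper n c).2 ⟨h1, h2⟩⟩
    · rintro ⟨c, ha, n, hn, h⟩
      obtain ⟨h1, h2⟩ := (hper n c).1 h
      exact ⟨n, hn, h1, c, h2, ha⟩
  by_cases hmatch : ∃ n ∈ names, PySem.Str.startswith n prefix_ = true
  · -- some name starts with prefix: the index is nonempty, both loops walk in lockstep
    have hc0 : PySem.Dict.contains children "" = true := by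
      rw [hK ""]
      obtain ⟨n, hn, hsw⟩ := hmatch
      exact ⟨n, hn, by rwa [show prefix_ ++ "" = prefix_ by simp]⟩
    have hne : children.items.isEmpty = false := by
      have hmemk : "" ∈ children.keys := (PySem.Dict.contains_iff_mem_keys _ _).1 hc0
      rw [Bool.eq_false_iff]
      intro hie
      rw [List.isEmpty_iff] at hie
      have : children.keys = [] := by
        simp only [PySem.Dict.keys, hie, List.map_nil]
      rw [this] at hmemk
      cases hmemk
    rw [hne]
    simp only [Bool.false_eq_true, if_false]
    cases hmin : PySem.List.min? (PySem.Set.ofList alphabet) (fun s => s) with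
    | none =>
      rw [PySem.List.min?_eq_none_iff] at hmin
      exact absurd (by
        rcases hq : alphabet with _ | ⟨x, t⟩
        · rfl
        · have : x ∈ PySem.Set.ofList alphabet := (PySem.Set.mem_ofList _ _).2 (by rw [hq]; exact List.mem_cons_self ..)
          rw [hmin] at this; cases this) hpre.1
    | some min_ =>
      have := pv_lockstep prefix_ names (PySem.Set.ofList alphabet) min_ hmin children hK hU
        ((names.map (fun n => n.toList.length)).foldl max 0 + 2) "" names
        (fun q => Iff.rfl)
      rwa [show prefix_ ++ "" = prefix_ by simp] at this
  · -- no name starts with prefix: A returns at once, B's index is empty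
    have hfalse : ∀ n ∈ names, PySem.Str.startswith n prefix_ = false := fun n hn =>
      Bool.eq_false_iff.2 (fun ht => hmatch ⟨n, hn, ht⟩)
    have hcemp : children = PySem.Dict.empty := by
      rw [hchildren, pv_fold_skip prefix_ names _ hfalse]
    rw [hcemp]
    have hie : (PySem.Dict.empty : PySem.Dict String (PySem.Set String)).items.isEmpty = true := rfl
    rw [hie]
    simp only [if_true]
    cases hmin : PySem.List.min? (PySem.Set.ofList alphabet) (fun s => s) with
    | none =>
      rw [PySem.List.min?_eq_none_iff] at hmin
      exact absurd (by
        rcases hq : alphabet with _ | ⟨x, t⟩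
        · rfl
        · have : x ∈ PySem.Set.ofList alphabet := (PySem.Set.mem_ofList _ _).2 (by rw [hq]; exact List.mem_cons_self ..)
          rw [hmin] at this; cases this) hpre.1
    | some min_ =>
      have hfil : List.filter (fun n => PySem.Str.startswith n prefix_) names = [] :=
        List.filter_eq_nil_iff.2 (fun n hn => by rw [hfalse n hn]; exact Bool.false_ne_true)
      rw [show (names.map (fun n => n.toList.length)).foldl max 0 + 2
          = ((names.map (fun n => n.toList.length)).foldl max 0 + 1) + 1 from rfl]
      simp only [pvALoop, hfil]
      rfl

theorem get_unused_prefix_py_raises : Claim_raises_get_unused_prefix_py := by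
  unfold Claim_raises_get_unused_prefix_py
  exact ⟨by intro p ns a _ hr hp; exact hp.1 hr.1, by decide⟩

-- self-check: the first half of the raises claim on its own — the raise region lies outside Pre_
theorem get_unused_prefix_py_raises_ok : ∀ (prefix_ : String) (names : List String) (alphabet : List String), Dom_get_unused_prefix_py prefix_ names alphabet → Raises_get_unused_prefix_py prefix_ names alphabet → ¬ Pre_get_unused_prefix_py prefix_ names alphabet :=
  get_unused_prefix_py_raises.1
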